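-- pv_equiv track=rewrite | github.com/blue-sky-r/Advent-Of-Code | 2023/12/u12.py | replace_mask
-- ===== SOURCE A (Python) =====
-- def replace_mask(line: str, replace: str, mask: str = '?') -> str:
--     """ replace q-marks in line with bit-symbols string """
--     r, ridx = [], 0
--     for c in line:
--         if c == mask:
--             r.append(replace[ridx])
--             ridx += 1
--         else:
--             r.append(c)
--     return ''.join(r)
-- ===== SOURCE B (Python) =====
-- def replace_mask(line: str, replace: str, mask: str = '?') -> str:
--     """ replace q-marks in line with bit-symbols string """
--     out = list(line)
--     idxs = [i for i, c in enumerate(line) if c == mask]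
--     for k, i in enumerate(idxs):
--         out[i] = replace[k]
--     return ''.join(out)
-- ===== Notes on version B (the rewrite author's own statement) =====
-- stated objective: alternative
-- what changed: B replaces A's single accumulator loop (append-and-count) by a collect-then-fill decomposition: copy the line into a list, collect all mask positions in one comprehension, then assign successive replacement characters at those positions.
import Mathlib
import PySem

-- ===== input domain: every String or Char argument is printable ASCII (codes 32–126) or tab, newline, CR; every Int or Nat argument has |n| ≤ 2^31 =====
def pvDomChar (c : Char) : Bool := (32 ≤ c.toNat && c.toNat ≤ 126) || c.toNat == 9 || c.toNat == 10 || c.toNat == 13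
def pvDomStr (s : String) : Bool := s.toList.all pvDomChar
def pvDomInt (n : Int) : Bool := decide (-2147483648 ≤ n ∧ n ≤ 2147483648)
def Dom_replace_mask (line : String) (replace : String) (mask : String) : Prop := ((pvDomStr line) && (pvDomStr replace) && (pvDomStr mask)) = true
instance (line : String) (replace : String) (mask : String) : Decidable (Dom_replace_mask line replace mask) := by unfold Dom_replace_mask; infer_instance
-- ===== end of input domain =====

-- B replaces A's single accumulator loop by a collect-then-fill decomposition (same O(n) cost).

-- ===== PORT A =====
-- A: one pass, appending replace[ridx] at mask chars, ridx counting; out-of-range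
-- replace index is a Python IndexError, excluded by Pre_ (port uses getD ' ' there).
def replace_mask (line : String) (replace : String) (mask : String) : String :=
  let res := line.toList.foldl
    (fun (st : List Char × Nat) c =>
      if [c] = mask.toList then
        (st.1 ++ [(PySem.List.pyGet? replace.toList (st.2 : Int)).getD ' '], st.2 + 1)
      else
        (st.1 ++ [c], st.2))
    ([], 0)
  String.ofList res.1

-- ===== PORT B =====
-- B: out = list(line); idxs = [i for i,c in enumerate(line) if c == mask];
--    for k,i in enumerate(idxs): out[i] = replace[k]; return ''.join(out)
def replace_mask_alt (line : String) (replace : String) (mask : String) : String :=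
  let out := line.toList
  let idxs := (PySem.List.enumerate line.toList 0).filterMap
    (fun p => if [p.2] = mask.toList then some p.1 else none)
  let filled := (PySem.List.enumerate idxs 0).foldl
    (fun (a : List Char) q =>
      a.set q.2.toNat ((PySem.List.pyGet? replace.toList q.1).getD ' '))
    out
  String.ofList filled

-- ===== PRECONDITION & SPEC =====
-- Pre_ excludes exactly the inputs where Python A raises IndexError (more mask
-- characters in line than characters in replace); B raises there too.
def Pre_replace_mask (line : String) (replace : String) (mask : String) : Prop :=
  line.toList.countP (fun c => decide ([c] = mask.toList)) ≤ replace.toList.length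
instance (line : String) (replace : String) (mask : String) : Decidable (Pre_replace_mask line replace mask) := by unfold Pre_replace_mask; infer_instance

def pvWitness_replace_mask : String × String × String := ("a?b?c", "01", "?")

def Spec_replace_mask (line : String) (replace : String) (mask : String) (out : String) : Prop := out = replace_mask_alt line replace mask
instance (line : String) (replace : String) (mask : String) (out : String) : Decidable (Spec_replace_mask line replace mask out) := by unfold Spec_replace_mask; infer_instance

-- ===== CLAIM (what is proved, stated in full; the proofs are below) =====
def Claim_equal_replace_mask : Prop := ∀ (line : String) (replace : String) (mask : String), Dom_replace_mask line replace mask → Pre_replace_mask line replace mask → Spec_replace_mask line replace mask (replace_mask line replace mask)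

-- ===== LEMMAS AND PROOFS =====

-- common reference function: the replaced character list, counter starting at n
def fRep (m rep : List Char) : List Char → Nat → List Char
  | [], _ => []
  | c :: cs, n =>
    if [c] = m then
      ((PySem.List.pyGet? rep (n : Int)).getD ' ') :: fRep m rep cs (n + 1)
    else
      c :: fRep m rep cs n

theorem fold_A_eq (m rep : List Char) (cs : List Char) : ∀ (r : List Char) (n : Nat),
    cs.foldl
      (fun (st : List Char × Nat) c =>
        if [c] = m then
          (st.1 ++ [(PySem.List.pyGet? rep (st.2 : Int)).getD ' '], st.2 + 1)
        else
          (st.1 ++ [c], st.2)) (r, n)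
    = (r ++ fRep m rep cs n, n + cs.countP (fun c => decide ([c] = m))) := by
  induction cs with
  | nil => intro r n; simp [fRep]
  | cons c cs ih =>
    intro r n
    by_cases h : [c] = m
    · rw [List.foldl_cons, if_pos h, ih]
      simp [fRep, h, Prod.ext_iff]
      omega
    · rw [List.foldl_cons, if_neg h, ih]
      simp [fRep, h]

theorem set_append_len (pre : List Char) (x c : Char) (cs : List Char) :
    (pre ++ c :: cs).set pre.length x = pre ++ x :: cs := by
  induction pre with
  | nil => simp
  | cons p ps ih => simp [ih]

theorem fold_B_eq (m rep : List Char) (cs : List Char) : ∀ (pre : List Char) (k : Nat),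
    ((PySem.List.enumerate
        ((PySem.List.enumerate cs (pre.length : Int)).filterMap
          (fun p => if [p.2] = m then some p.1 else none)) (k : Int)).foldl
      (fun (a : List Char) q =>
        a.set q.2.toNat ((PySem.List.pyGet? rep q.1).getD ' ')) (pre ++ cs))
    = pre ++ fRep m rep cs k := by
  induction cs with
  | nil => intro pre k; simp [fRep, PySem.List.enumerate_nil]
  | cons c cs ih =>
    intro pre k
    rw [PySem.List.enumerate_cons, List.filterMap_cons]
    by_cases h : [c] = m
    · simp only [if_pos h, PySem.List.enumerate_cons, List.foldl_cons]
      rw [Int.toNat_natCast, set_append_len]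
      have hx := ih (pre ++ [(PySem.List.pyGet? rep (k : Int)).getD ' ']) (k + 1)
      push_cast at hx
      simpa [fRep, h] using hx
    · simp only [if_neg h]
      have hx := ih (pre ++ [c]) k
      push_cast at hx
      simpa [fRep, h] using hx

-- ===== VERDICT (by name: the statement is the Claim_ definition above) =====
theorem replace_mask_spec : Claim_equal_replace_mask := by
  intro line replace mask _ _
  unfold Spec_replace_mask
  show replace_mask line replace mask = replace_mask_alt line replace mask
  have hA := fold_A_eq mask.toList replace.toList line.toList [] 0
  have hB := fold_B_eq mask.toList replace.toList line.toList [] 0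
  simp only [List.length_nil, Nat.cast_zero, List.nil_append] at hA hB
  simp only [replace_mask, replace_mask_alt, hA, hB]
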